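-- pv_equiv track=rewrite | github.com/yxjiang/ml_playground | display_pages.py | displayPages
-- ===== SOURCE A (Python) =====
-- def displayPages(lines, page_size):
--     """
--     1) Use a map to keep the extra listings for each of the hosts, where
--         key is the host_id and val is the queue of listings.
--     2) Use a set to keep track of whether a listing of a host has been displayed.
--     """
--     class Node:
--         def __init__(self, line):
--             self.host_id = line.split(',')[0]
--             self.line = line
--             self.next = None
--
--     if len(lines) == 0:
--         return []
--     # construct linked list
--     head = Node('-1, 0')  # fake head
--     cur = head
--     for line in lines[1:]:
--         cur.next = Node(line)
--         cur = cur.next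
--     prev = head
--     cur = head.next
--     res = []
--     visited = set([])
--     count = 0
--     reach_end = False
--     while cur is not None:
--         if cur.host_id not in visited or reach_end:
--             visited.add(cur.host_id)
--             res.append(cur.line)
--             prev.next = cur.next  # remove cur node
--             count += 1
--             cur = cur.next
--         else:
--             prev = cur
--             cur = cur.next
--         if count == page_size:  # revist previous listings in new page
--             res.append('===')  # page separator
--             count = 0
--             reach_end = False
--             visited.clear()
--             prev = head
--             cur = head.next
--         if cur is None:  # reach to the end
--             reach_end = True
--             prev = head
--             cur = head.next
--     return res
-- ===== SOURCE B (Python) =====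
-- def displayPages(lines, page_size):
--     # Page-by-page: scan the pending items once per page, showing lines whose
--     # host is new on this page and holding back duplicates; if pending runs out
--     # before the page fills, held-back lines top the page up (in order).
--     # Like the original, the first element of `lines` is never displayed.
--     res = []
--     # pending holds (host, line), in reverse so pop() yields the front
--     pending = [(l.split(',')[0], l) for l in lines[:0:-1]]
--     while pending:
--         page, held, seen = [], [], set()
--         filled = False
--         while pending:
--             item = pending.pop()
--             if item[0] in seen:
--                 held.append(item)
--             else:
--                 seen.add(item[0])
--                 page.append(item[1])
--                 if len(page) == page_size:
--                     filled = True
--                     break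
--         res += page
--         if filled:
--             res.append('===')
--             pending.extend(reversed(held))
--         else:
--             need = page_size - len(page)
--             if 0 < need <= len(held):
--                 res += [it[1] for it in held[:need]]
--                 res.append('===')
--                 pending.extend(reversed(held[need:]))
--             else:
--                 res += [it[1] for it in held]
--     return res
-- ===== Notes on version B (the rewrite author's own statement) =====
-- stated objective: alternative
-- what changed: A simulates a linked list of nodes with prev/cur pointers, a reach_end flag and repeated restarts from the fake head; B builds the result page by page with an explicit pending stack, a per-page host set and a held-back list, topping up a short final page arithmetically (held[:need]) instead of re-walking the list, and caches each line's host id once.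
import Mathlib
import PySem

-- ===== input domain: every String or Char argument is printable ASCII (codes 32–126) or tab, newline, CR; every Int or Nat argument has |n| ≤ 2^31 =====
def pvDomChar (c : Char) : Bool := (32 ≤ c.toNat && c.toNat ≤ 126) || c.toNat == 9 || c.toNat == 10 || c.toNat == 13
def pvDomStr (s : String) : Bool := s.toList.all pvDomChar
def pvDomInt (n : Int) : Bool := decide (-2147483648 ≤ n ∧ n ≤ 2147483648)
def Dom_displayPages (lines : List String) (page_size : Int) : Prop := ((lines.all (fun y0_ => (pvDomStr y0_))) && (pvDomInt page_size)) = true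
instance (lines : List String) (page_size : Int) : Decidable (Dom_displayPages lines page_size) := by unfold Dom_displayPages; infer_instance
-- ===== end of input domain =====

-- B replaces A's linked-list traversal with restarts by an explicit page-by-page
-- construction (one dedup scan per page with a held-back list; a short final scan is
-- topped up from the held-back lines arithmetically). Alternative decomposition.
-- ===== PORT A =====

-- line.split(",")[0]: split? is some for sep ≠ "" and its result is never []
def hostId (line : String) : String := ((PySem.Str.split? line ",").getD []).headD ""

lemma lex4 {a1 b1 c1 d1 a2 b2 c2 d2 : Nat}
    (h : a1 < a2 ∨ (a1 = a2 ∧ (b1 < b2 ∨ (b1 = b2 ∧ (c1 < c2 ∨ (c1 = c2 ∧ d1 < d2)))))) :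
    Prod.Lex (· < ·) (Prod.Lex (· < ·) (Prod.Lex (· < ·) (· < ·)))
      ((a1, b1, c1, d1) : Nat × Nat × Nat × Nat) (a2, b2, c2, d2) := by
  rcases h with h | ⟨rfl, h | ⟨rfl, h | ⟨rfl, h⟩⟩⟩
  · exact Prod.Lex.left _ _ h
  · exact Prod.Lex.right _ (Prod.Lex.left _ _ h)
  · exact Prod.Lex.right _ (Prod.Lex.right _ (Prod.Lex.left _ _ h))
  · exact Prod.Lex.right _ (Prod.Lex.right _ (Prod.Lex.right _ h))

def aLoop (ps : Int) (front rest res : List String) (visited : PySem.Set String)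
    (count : Int) (reachEnd : Bool) : List String :=
  match rest with
  | [] => res
  | l :: ls =>
    let hid := hostId l
    if (!(PySem.Set.contains visited hid)) || reachEnd then
      let res' := res ++ [l]
      let vis' := PySem.Set.add visited hid
      if count + 1 == ps then
        let res'' := res' ++ ["==="]
        if front ++ ls = [] then res''
        else aLoop ps [] (front ++ ls) res'' PySem.Set.empty 0 false
      else
        if ls = [] then aLoop ps [] front res' vis' (count + 1) true
        else aLoop ps front ls res' vis' (count + 1) reachEnd
    else
      if count == ps then
        aLoop ps [] (front ++ l :: ls) (res ++ ["==="]) PySem.Set.empty 0 false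
      else
        if ls = [] then aLoop ps [] (front ++ [l]) res visited count true
        else aLoop ps (front ++ [l]) ls res visited count reachEnd
  termination_by (front.length + rest.length, (if reachEnd then 0 else 1),
    visited.length, rest.length)
  decreasing_by
  · apply lex4; left; simp
  · apply lex4; left; simp
  · apply lex4; left; simp
  · rename_i h1 h2
    simp only [Bool.not_eq_true, Bool.or_eq_false_iff] at h1
    apply lex4; right
    refine ⟨by simp, ?_⟩
    rw [h1.2]
    refine Or.inr ⟨rfl, Or.inl ?_⟩
    cases visited with
    | nil => simp [PySem.Set.contains] at h1
    | cons x xs => simp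
  · rename_i h1 h2 h3
    simp only [Bool.not_eq_true, Bool.or_eq_false_iff] at h1
    apply lex4; right
    refine ⟨by simp_all, ?_⟩
    rw [h1.2]; left; simp
  · rename_i h1 h2 h3
    simp only [Bool.not_eq_true, Bool.or_eq_false_iff] at h1
    apply lex4; right
    refine ⟨by simp; omega, Or.inr ⟨by rw [h1.2], Or.inr ⟨rfl, by simp⟩⟩⟩

def displayPages (lines : List String) (page_size : Int) : List String :=
  if lines.length == 0 then []
  else aLoop page_size [] (lines.drop 1) [] PySem.Set.empty 0 false
-- ===== PORT B =====
-- tag l = (l.split(',')[0], l): the pairs Source B stores in `pending`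
def tagLine (l : String) : String × String := (hostId l, l)

-- the inner while-loop of Source B; Source B keeps `pending` reversed so that pop()
-- yields the front element — here pending is kept in front-first order.
-- returns (page, held, filled, unscanned rest)
def bScan (ps : Int) (pending : List (String × String)) (page : List String)
    (held : List (String × String)) (seen : PySem.Set String) :
    List String × List (String × String) × Bool × List (String × String) :=
  match pending with
  | [] => (page, held, false, [])
  | item :: ls =>
    if PySem.Set.contains seen item.1 then bScan ps ls page (held ++ [item]) seen
    else if (((page ++ [item.2]).length : Int)) == ps then (page ++ [item.2], held, true, ls)
    else bScan ps ls (page ++ [item.2]) held (PySem.Set.add seen item.1)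

lemma bScan_len (ps : Int) (pending : List (String × String)) (page : List String)
    (held : List (String × String)) (seen : PySem.Set String) :
    (bScan ps pending page held seen).1.length + (bScan ps pending page held seen).2.1.length
        + (bScan ps pending page held seen).2.2.2.length
      = page.length + held.length + pending.length
    ∧ ((bScan ps pending page held seen).2.2.1 = true →
        page.length < (bScan ps pending page held seen).1.length)
    ∧ ((bScan ps pending page held seen).2.2.1 = false →
        (bScan ps pending page held seen).2.2.2 = []) := by
  induction pending generalizing page held seen with
  | nil => simp [bScan]
  | cons item ls ih =>
    simp only [bScan]
    split
    · have := ih page (held ++ [item]) seen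
      refine ⟨by simp at this ⊢; omega, this.2.1, this.2.2⟩
    · split
      · simp; omega
      · have := ih (page ++ [item.2]) held (PySem.Set.add seen item.1)
        refine ⟨by simp at this ⊢; omega, ?_, this.2.2⟩
        intro h; have h2 := this.2.1 h; simp at h2; omega

-- the outer while-loop of Source B (res accumulated by appending on return)
def bPages (ps : Int) (pending : List (String × String)) : List String :=
  match hp : pending with
  | [] => []
  | x :: xs =>
    match hs : bScan ps pending [] [] PySem.Set.empty with
    | (page, held, filled, rest) =>
      if filled then page ++ ["==="] ++ bPages ps (held ++ rest)
      else
        let need := ps - (page.length : Int)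
        if 0 < need ∧ need ≤ (held.length : Int) then
          page ++ (held.take need.toNat).map Prod.snd ++ ["==="]
            ++ bPages ps (held.drop need.toNat)
        else page ++ held.map Prod.snd
  termination_by pending.length
  decreasing_by
  all_goals
    obtain ⟨h1, h2, h3⟩ := bScan_len ps pending [] [] PySem.Set.empty
    rw [hs] at h1 h2 h3; simp only at h1 h2 h3
    rw [hp] at h1
  · rename_i hf
    have := h2 hf
    simp at h1 ⊢; omega
  · rename_i hf hneed
    have := h3 (by simpa using hf)
    subst this
    simp at h1 ⊢; omega

def displayPages_alt (lines : List String) (page_size : Int) : List String :=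
  bPages page_size ((lines.drop 1).map tagLine)

-- ===== PRECONDITION & SPEC =====
def Spec_displayPages (lines : List String) (page_size : Int) (out : List String) : Prop := out = displayPages_alt lines page_size
instance (lines : List String) (page_size : Int) (out : List String) : Decidable (Spec_displayPages lines page_size out) := by unfold Spec_displayPages; infer_instance

-- ===== CLAIM (what is proved, stated in full; the proofs are below) =====
def Claim_equal_displayPages : Prop := ∀ (lines : List String) (page_size : Int), Dom_displayPages lines page_size → Spec_displayPages lines page_size (displayPages lines page_size)

-- ===== LEMMAS AND PROOFS =====

-- proof-side abbreviations for the tail of Source B's outer loop body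
def flushOut (ps : Int) (page : List String) (held : List (String × String)) : List String :=
  if 0 < ps - (page.length : Int) ∧ ps - (page.length : Int) ≤ (held.length : Int) then
    page ++ (held.take (ps - (page.length : Int)).toNat).map Prod.snd ++ ["==="]
      ++ bPages ps (held.drop (ps - (page.length : Int)).toNat)
  else page ++ held.map Prod.snd

def afterScan (ps : Int) (t : List String × List (String × String) × Bool × List (String × String)) :
    List String :=
  if t.2.2.1 = true then t.1 ++ ["==="] ++ bPages ps (t.2.1 ++ t.2.2.2)
  else flushOut ps t.1 t.2.1

lemma map_tagLine_snd (xs : List String) : (xs.map tagLine).map Prod.snd = xs := by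
  simp [Function.comp_def, tagLine]

lemma bPages_cons (ps : Int) (x : String × String) (xs : List (String × String)) :
    bPages ps (x :: xs) = afterScan ps (bScan ps (x :: xs) [] [] PySem.Set.empty) := by
  rw [bPages]
  rcases hsc : bScan ps (x :: xs) [] [] PySem.Set.empty with ⟨page, held, filled, rest⟩
  simp only [afterScan, flushOut, hsc]

lemma bPages_nil (ps : Int) : bPages ps [] = [] := by rw [bPages]

lemma flushOut_map (ps : Int) (page : List String) (held : List String) :
    flushOut ps page (held.map tagLine)
      = if 0 < ps - (page.length : Int) ∧ ps - (page.length : Int) ≤ (held.length : Int) then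
          page ++ held.take (ps - (page.length : Int)).toNat ++ ["==="]
            ++ bPages ps ((held.drop (ps - (page.length : Int)).toNat).map tagLine)
        else page ++ held := by
  simp only [flushOut, ← List.map_take, ← List.map_drop, map_tagLine_snd, List.length_map]

lemma flush_eq (ps : Int) (held : List String) :
    ∀ (R : List String) (seen : PySem.Set String) (c : Int),
    (∀ q : List String, q.length < held.length → ∀ R' : List String,
        aLoop ps [] q R' PySem.Set.empty 0 false = R' ++ bPages ps (q.map tagLine)) →
    aLoop ps [] held R seen c true
      = if 0 < ps - c ∧ ps - c ≤ (held.length : Int) then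
          R ++ held.take (ps - c).toNat ++ ["==="]
            ++ bPages ps ((held.drop (ps - c).toNat).map tagLine)
        else R ++ held := by
  induction held with
  | nil =>
    intro R seen c _
    rw [aLoop]
    split_ifs with h
    · exfalso; simp at h; omega
    · simp
  | cons l t ih =>
    intro R seen c H2
    rw [aLoop]
    simp only [Bool.or_true, eq_self_iff_true, if_true, beq_iff_eq]
    by_cases hc : c + 1 = ps
    · simp only [hc, if_pos rfl, List.nil_append]
      have h1 : ps - c = 1 := by omega
      by_cases ht : t = []
      · subst ht
        simp only [if_pos rfl]
        simp [h1, bPages_nil]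
      · rw [if_neg ht]
        rw [H2 t (by simp) _]
        rw [if_pos (by constructor <;> (simp; omega)), h1]
        simp
    · rw [if_neg hc]
      by_cases ht : t = []
      · subst ht
        simp only [if_pos rfl]
        rw [aLoop]
        split_ifs with hcnd h2 h3
        · exfalso
          have hl : (([l] : List String).length : Int) = 1 := by norm_num
          rw [hl] at h2
          omega
        · rfl
        · exact absurd trivial hcnd
        · exact absurd trivial hcnd
      · rw [if_neg ht]
        rw [ih _ _ _ (fun q hq => H2 q (by simp at hq ⊢; omega))]
        by_cases hcond : 0 < ps - c ∧ ps - c ≤ ((l :: t).length : Int)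
        · rw [if_pos (by simp at hcond ⊢; omega), if_pos hcond]

          have h2 : (ps - (c + 1)).toNat = (ps - c).toNat - 1 := by omega
          have h3 : (ps - c).toNat = ((ps - c).toNat - 1) + 1 := by
            simp at hcond; omega
          rw [h2, h3, List.take_succ_cons, List.drop_succ_cons]
          simp
        · rw [if_neg (by simp at hcond ⊢; omega), if_neg hcond]
          simp

lemma scan_eq (ps : Int) :
    ∀ (pending heldA page : List String) (seen : PySem.Set String) (R : List String),
    pending ≠ [] →
    ((page.length : Int) = ps → seen = []) →
    (∀ q : List String, q.length < heldA.length + pending.length → ∀ R' : List String,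
        aLoop ps [] q R' PySem.Set.empty 0 false = R' ++ bPages ps (q.map tagLine)) →
    aLoop ps heldA pending (R ++ page) seen (page.length : Int) false
      = R ++ afterScan ps (bScan ps (pending.map tagLine) page (heldA.map tagLine) seen) := by
  intro pending
  induction pending with
  | nil => intro _ _ _ _ h; exact absurd rfl h
  | cons l ls ih =>
    intro heldA page seen R _ Hinv H2
    rw [aLoop, List.map_cons, bScan]
    by_cases hcont : PySem.Set.contains seen (hostId l) = true
    · -- duplicate host on this page: A skips the node, B holds the line back
      have hne : ¬ ((page.length : Int) = ps) := fun h => by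
        rw [Hinv h] at hcont; simp [PySem.Set.contains] at hcont
      rw [if_neg (by simpa using hcont), if_neg (by simpa using hne)]
      show (if ls = [] then _ else _) = _
      have hitem : (tagLine l).1 = hostId l := rfl
      rw [hitem, if_pos hcont]
      by_cases hls : ls = []
      · subst hls
        rw [if_pos rfl]
        simp only [List.map_nil, bScan]
        rw [flush_eq ps (heldA ++ [l]) _ seen (page.length : Int)
              (fun q hq => H2 q (by simp at hq ⊢; omega))]
        have : (heldA.map tagLine) ++ [tagLine l] = (heldA ++ [l]).map tagLine := by simp
        rw [afterScan, this, flushOut_map]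
        push_cast
        split_ifs with h1 h2 <;> first
          | (exfalso; revert h1 h2; push_cast; omega)
          | (push_cast; simp)
      · rw [if_neg hls]
        have : (heldA.map tagLine) ++ [tagLine l] = (heldA ++ [l]).map tagLine := by simp
        rw [this]
        exact ih (heldA ++ [l]) page seen R hls Hinv
          (fun q hq => H2 q (by simp at hq ⊢; omega))
    · -- fresh host: A shows the node, B appends it to the page
      rw [if_pos (by simp only [Bool.or_false]; simpa using hcont)]
      have hitem1 : (tagLine l).1 = hostId l := rfl
      have hitem2 : (tagLine l).2 = l := rfl
      rw [hitem1, hitem2, if_neg hcont]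
      have happ : (R ++ page) ++ [l] = R ++ (page ++ [l]) := by simp
      have hlen : ((page ++ [l]).length : Int) = (page.length : Int) + 1 := by
        push_cast; simp
      by_cases hps : (page.length : Int) + 1 = ps
      · rw [if_pos (show ((page.length : Int) + 1 == ps) = true by simpa using hps)]
        by_cases hrest : heldA ++ ls = []
        · rw [if_pos hrest,
            if_pos (show ((((page ++ [l]).length : Int)) == ps) = true by
              rw [hlen]; simpa using hps)]
          obtain ⟨h1, h2⟩ := List.append_eq_nil_iff.mp hrest
          subst h1; subst h2
          rw [afterScan]
          simp [bPages_nil]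
        · rw [if_neg hrest,
            if_pos (show ((((page ++ [l]).length : Int)) == ps) = true by
              rw [hlen]; simpa using hps)]
          rw [H2 (heldA ++ ls) (by simp) _]
          rw [afterScan]
          simp
      · rw [if_neg (show ¬ ((page.length : Int) + 1 == ps) = true by simpa using hps),
            if_neg (show ¬ ((((page ++ [l]).length : Int)) == ps) = true by
              rw [hlen]; simpa using hps)]
        by_cases hls : ls = []
        · subst hls
          rw [if_pos rfl]
          simp only [List.map_nil, bScan]
          rw [happ]
          rw [show ((page.length : Int) + 1) = (((page ++ [l]).length : Int)) from hlen.symm]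
          rw [flush_eq ps heldA _ _ _
              (fun q hq => H2 q (by simp at hq ⊢; omega))]
          rw [afterScan, flushOut_map]
          push_cast
          split_ifs with h1 h2 <;> first
            | (exfalso; revert h1 h2; push_cast; omega)
            | (push_cast; simp)
        · rw [if_neg hls, happ]
          rw [show ((page.length : Int) + 1) = (((page ++ [l]).length : Int)) from hlen.symm]
          exact ih heldA (page ++ [l]) (PySem.Set.add seen (hostId l)) R hls
            (fun h => absurd h (by rw [hlen]; simpa using hps))
            (fun q hq => H2 q (by simp at hq ⊢; omega))
lemma fresh_eq (ps : Int) : ∀ (N : Nat) (q : List String), q.length ≤ N →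
    ∀ R : List String, aLoop ps [] q R PySem.Set.empty 0 false = R ++ bPages ps (q.map tagLine) := by
  intro N
  induction N with
  | zero =>
    intro q hq R
    rw [List.length_eq_zero_iff.mp (Nat.le_zero.mp hq)]
    rw [aLoop, List.map_nil, bPages_nil]
    simp
  | succ n ihN =>
    intro q hq R
    cases q with
    | nil => rw [aLoop, List.map_nil, bPages_nil]; simp
    | cons l t =>
      have H2 : ∀ q' : List String, q'.length < ([] : List String).length + (l :: t).length →
          ∀ R' : List String, aLoop ps [] q' R' PySem.Set.empty 0 false
            = R' ++ bPages ps (q'.map tagLine) := by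
        intro q' hq' R'
        exact ihN q' (by simp at hq hq' ⊢; omega) R'
      have := scan_eq ps (l :: t) [] [] PySem.Set.empty R (by simp)
        (fun _ => rfl) H2
      rw [show ((([] : List String).length : Int)) = 0 by simp, show R ++ ([] : List String) = R by simp] at this
      rw [this, List.map_cons, bPages_cons, List.map_nil]

lemma displayPages_eq (lines : List String) (page_size : Int) :
    displayPages lines page_size = displayPages_alt lines page_size := by
  cases lines with
  | nil => simp [displayPages, displayPages_alt, bPages_nil]
  | cons x xs =>
    show aLoop page_size [] xs [] PySem.Set.empty 0 false = displayPages_alt (x :: xs) page_size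
    have := fresh_eq page_size xs.length xs le_rfl []
    simpa [displayPages_alt] using this

-- ===== VERDICT (by name: the statement is the Claim_ definition above) =====
theorem displayPages_spec : Claim_equal_displayPages := by
  intro lines page_size _
  show displayPages lines page_size = displayPages_alt lines page_size
  exact displayPages_eq lines page_size
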